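-- pv_equiv track=rewrite | github.com/ejb816/nexonix | draco-dev-journal/tools/gaps/build_chapter.py | format_dev_prompt
-- ===== SOURCE A (Python) =====
-- def format_dev_prompt(prompt):
--     """Format a user prompt as a Dev blockquote."""
--     lines = prompt.split('\n')
--     result = []
--     for i, line in enumerate(lines):
--         if i == 0:
--             result.append(f'> **Dev:** {line}')
--         else:
--             result.append(f'> {line}')
--     return '\n'.join(result)
-- ===== SOURCE B (Python) =====
-- def format_dev_prompt(prompt):
--     """Format a user prompt as a Dev blockquote."""
--     return '> **Dev:** ' + prompt.replace('\n', '\n> ')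
-- ===== Notes on version B (the rewrite author's own statement) =====
-- stated objective: simpler
-- what changed: Replaces the split/enumerate/branch/join loop with a single expression: prepend the Dev marker and turn every interior newline into a newline followed by the quote prefix via one replace call.
import Mathlib
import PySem

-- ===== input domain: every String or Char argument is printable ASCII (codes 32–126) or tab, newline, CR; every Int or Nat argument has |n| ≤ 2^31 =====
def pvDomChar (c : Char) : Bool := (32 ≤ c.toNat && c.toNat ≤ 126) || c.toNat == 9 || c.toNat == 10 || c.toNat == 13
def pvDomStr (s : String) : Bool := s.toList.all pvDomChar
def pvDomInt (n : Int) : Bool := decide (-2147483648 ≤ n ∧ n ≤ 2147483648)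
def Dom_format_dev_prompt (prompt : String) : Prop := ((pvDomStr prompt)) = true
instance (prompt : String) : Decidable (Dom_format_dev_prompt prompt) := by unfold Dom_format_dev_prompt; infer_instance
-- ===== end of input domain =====

-- B replaces A's split/enumerate/branch/join loop with a single prepend-plus-replace expression (simpler; same cost).

-- ===== PORT A =====
def format_dev_prompt (prompt : String) : String :=
  let lines := (PySem.Str.split? prompt "\n").getD []
  let result := (PySem.List.enumerate lines).foldl
    (fun res p => if p.1 == 0 then res ++ ["> **Dev:** " ++ p.2] else res ++ ["> " ++ p.2])
    ([] : List String)
  PySem.Str.join "\n" result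


-- ===== PORT B =====
def format_dev_prompt_alt (prompt : String) : String :=
  "> **Dev:** " ++ PySem.Str.replace prompt "\n" "\n> "


-- ===== PRECONDITION & SPEC =====
def Spec_format_dev_prompt (prompt : String) (out : String) : Prop := out = format_dev_prompt_alt prompt
instance (prompt : String) (out : String) : Decidable (Spec_format_dev_prompt prompt out) := by unfold Spec_format_dev_prompt; infer_instance

-- ===== CLAIM (what is proved, stated in full; the proofs are below) =====
def Claim_equal_format_dev_prompt : Prop := ∀ (prompt : String), Dom_format_dev_prompt prompt → Spec_format_dev_prompt prompt (format_dev_prompt prompt)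

-- ===== LEMMAS AND PROOFS =====

def repSpec : List Char → List Char
  | [] => []
  | c :: t => if c = '\n' then '\n' :: '>' :: ' ' :: repSpec t else c :: repSpec t

theorem replace_go_eq (cs : List Char) : ∀ (fuel : Nat) (acc : List Char), cs.length ≤ fuel →
    PySem.Chars.replace.go ['\n'] ['\n', '>', ' '] fuel cs acc = acc.reverse ++ repSpec cs := by
  induction cs with
  | nil =>
    intro fuel acc _
    cases fuel <;> simp [PySem.Chars.replace.go, repSpec]
  | cons c t ih =>
    intro fuel acc h
    cases fuel with
    | zero => simp at h
    | succ n =>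
      rw [PySem.Chars.replace.go]
      by_cases hc : c = '\n'
      · subst hc
        simp only [List.isPrefixOf, BEq.rfl, Bool.and_self, List.isPrefixOf_nil_left, if_pos,
          List.length_cons, List.length_nil, List.drop_succ_cons, List.drop_zero, List.reverse_cons,
          List.reverse_nil, List.nil_append]
        rw [show ([' '] ++ ['>'] ++ ['\n'] ++ acc) = (' ' :: '>' :: '\n' :: acc) from rfl, ih n (' ' :: '>' :: '\n' :: acc) (by simpa using h)]
        simp [repSpec]
      · have hpre : ['\n'].isPrefixOf (c :: t) = false := by
          simp [List.isPrefixOf, hc, Ne.symm hc]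
        rw [hpre]
        simp only [Bool.false_eq_true, if_false]
        rw [ih n (c :: acc) (by simpa using h)]
        simp [repSpec, hc]

def splitSpec (cur : List Char) : List Char → List (List Char)
  | [] => [cur.reverse]
  | c :: t => if c = '\n' then cur.reverse :: splitSpec [] t else splitSpec (c :: cur) t

theorem split_go_eq (cs : List Char) : ∀ (fuel : Nat) (cur : List Char) (acc : List (List Char)),
    cs.length ≤ fuel →
    PySem.Chars.splitOn.go ['\n'] fuel cs cur acc = acc.reverse ++ splitSpec cur cs := by
  induction cs with
  | nil =>
    intro fuel cur acc _
    cases fuel <;> simp [PySem.Chars.splitOn.go, splitSpec]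
  | cons c t ih =>
    intro fuel cur acc h
    cases fuel with
    | zero => simp at h
    | succ n =>
      rw [PySem.Chars.splitOn.go]
      by_cases hc : c = '\n'
      · subst hc
        simp only [List.isPrefixOf, BEq.rfl, Bool.and_self, if_pos, List.length_cons,
          List.length_nil, List.drop_succ_cons, List.drop_zero]
        rw [ih n [] (cur.reverse :: acc) (by simpa using h)]
        simp [splitSpec]
      · have hpre : ['\n'].isPrefixOf (c :: t) = false := by
          simp [List.isPrefixOf, Ne.symm hc]
        rw [hpre]
        simp only [Bool.false_eq_true, if_false]
        rw [ih n (c :: cur) acc (by simpa using h)]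
        simp [splitSpec, hc]

theorem splitSpec_cons (cs : List Char) : ∀ (cur : List Char),
    ∃ h t, splitSpec cur cs = h :: t := by
  induction cs with
  | nil => intro cur; exact ⟨cur.reverse, [], rfl⟩
  | cons c t ih =>
    intro cur
    by_cases hc : c = '\n'
    · subst hc; exact ⟨cur.reverse, splitSpec [] t, by simp [splitSpec]⟩
    · simpa [splitSpec, hc] using ih (c :: cur)

theorem key2 (cs : List Char) : ∀ (cur : List Char),
    PySem.Chars.join ['\n'] ((splitSpec cur cs).map (['>', ' '] ++ ·)) =
      '>' :: ' ' :: cur.reverse ++ repSpec cs := by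
  induction cs with
  | nil =>
    intro cur
    simp [splitSpec, repSpec, PySem.Chars.join_singleton]
  | cons c t ih =>
    intro cur
    by_cases hc : c = '\n'
    · subst hc
      obtain ⟨h0, t0, hs⟩ := splitSpec_cons t []
      have hih := ih []
      rw [hs] at hih
      simp only [splitSpec, if_pos, List.map_cons, hs]
      rw [PySem.Chars.join_cons_cons]
      rw [List.map_cons] at hih
      rw [hih]
      simp [repSpec]
    · simp only [splitSpec, hc, if_false]
      rw [ih (c :: cur)]
      simp [repSpec, hc]

theorem key1 (cs : List Char) : ∀ (cur pre : List Char),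
    PySem.Chars.join ['\n']
      (match splitSpec cur cs with
       | h :: t => (pre ++ h) :: t.map (['>', ' '] ++ ·)
       | [] => []) = pre ++ cur.reverse ++ repSpec cs := by
  induction cs with
  | nil =>
    intro cur pre
    simp [splitSpec, repSpec, PySem.Chars.join_singleton]
  | cons c t ih =>
    intro cur pre
    by_cases hc : c = '\n'
    · subst hc
      obtain ⟨h0, t0, hs⟩ := splitSpec_cons t []
      have hk := key2 t []
      rw [hs] at hk
      simp only [splitSpec, if_pos, hs, List.map_cons]
      rw [PySem.Chars.join_cons_cons]
      rw [List.map_cons] at hk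
      rw [hk]
      simp [repSpec]
    · simp only [splitSpec, hc, if_false]
      rw [ih (c :: cur) pre]
      simp [repSpec, hc]


theorem foldl_enum_pos (xs : List String) : ∀ (s : Int) (res : List String), 1 ≤ s →
    (PySem.List.enumerate xs s).foldl
      (fun res p => if p.1 == 0 then res ++ ["> **Dev:** " ++ p.2] else res ++ ["> " ++ p.2]) res
      = res ++ xs.map (fun l => "> " ++ l) := by
  induction xs with
  | nil => intro s res _; simp [PySem.List.enumerate_nil]
  | cons x t ih =>
    intro s res hs
    rw [PySem.List.enumerate_cons, List.foldl_cons]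
    have hne : (s == (0 : Int)) = false := by simp; omega
    rw [ih (s + 1) _ (by omega)]
    simp [hne]

theorem toList_eq (prompt : String) :
    (format_dev_prompt prompt).toList = (format_dev_prompt_alt prompt).toList := by
  obtain ⟨h0, t0, hs⟩ := splitSpec_cons prompt.toList []
  have hnl : ("\n" : String).toList = ['\n'] := by decide
  have hnlg : ("\n> " : String).toList = ['\n', '>', ' '] := by decide
  have hsplit : PySem.Chars.split? prompt.toList ("\n" : String).toList = some (h0 :: t0) := by
    rw [hnl, PySem.Chars.split?]
    simp only [List.isEmpty_cons, Bool.false_eq_true, if_false]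
    rw [PySem.Chars.splitOn, split_go_eq _ _ _ _ (by omega)]
    simpa using hs
  unfold format_dev_prompt format_dev_prompt_alt
  rw [PySem.Str.split?, hsplit]
  simp only [Option.map_some, Option.getD_some, List.map_cons]
  rw [PySem.List.enumerate_cons, List.foldl_cons]
  simp only [BEq.rfl, if_pos, List.nil_append]
  rw [show ((0:Int)+1) = 1 from by norm_num, foldl_enum_pos _ 1 _ le_rfl]
  rw [String.toList_append, PySem.Str.toList_replace, PySem.Str.toList_join, hnl, hnlg]
  have hrep : PySem.Chars.replace prompt.toList ['\n'] ['\n', '>', ' '] = repSpec prompt.toList := by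
    rw [PySem.Chars.replace]
    simp only [List.isEmpty_cons, Bool.false_eq_true, if_false]
    rw [replace_go_eq _ _ _ le_rfl]
    rfl
  rw [hrep]
  have hk := key1 prompt.toList [] ("> **Dev:** " : String).toList
  rw [hs] at hk
  simp only [List.reverse_nil, List.append_nil] at hk
  rw [← hk]
  congr 1
  simp only [List.singleton_append, List.map_cons, List.map_map, String.toList_append,
    String.toList_ofList, List.cons.injEq]
  refine ⟨trivial, ?_⟩
  apply List.map_congr_left
  intro x _
  simp only [Function.comp_apply, String.toList_append, String.toList_ofList]
  rw [show ("> " : String).toList = ['>', ' '] from by decide]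

-- ===== VERDICT (by name: the statement is the Claim_ definition above) =====
theorem format_dev_prompt_spec : Claim_equal_format_dev_prompt := by
  intro prompt _
  show format_dev_prompt prompt = format_dev_prompt_alt prompt
  exact String.toList_inj.mp (toList_eq prompt)
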